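-- pv_equiv track=rewrite | github.com/tranzmatt/EurekaClaw | eurekaclaw/tools/latex_section.py | _match_by_name
-- ===== SOURCE A (Python) =====
-- def _match_by_name(headings: list[dict], query: str) -> int | None:
--     q = query.lower()
--     for i, h in enumerate(headings):
--         if q == h["title"].lower():
--             return i
--     # Fallback: substring match
--     for i, h in enumerate(headings):
--         if q in h["title"].lower():
--             return i
--     return None
-- ===== SOURCE B (Python) =====
-- def _match_by_name(headings: list[dict], query: str) -> int | None:
--     q = query.lower()
--     fallback = None
--     for i, h in enumerate(headings):
--         t = h["title"].lower()
--         if q == t: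
--             return i
--         if fallback is None and q in t:
--             fallback = i
--     return fallback
-- ===== Notes on version B (the rewrite author's own statement) =====
-- stated objective: simpler
-- what changed: A's two sequential enumerate scans (exact pass, then substring pass) are merged into one pass that returns an exact match immediately and remembers the earliest substring hit as a fallback, so each title is lowercased once instead of up to twice.
import Mathlib
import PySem

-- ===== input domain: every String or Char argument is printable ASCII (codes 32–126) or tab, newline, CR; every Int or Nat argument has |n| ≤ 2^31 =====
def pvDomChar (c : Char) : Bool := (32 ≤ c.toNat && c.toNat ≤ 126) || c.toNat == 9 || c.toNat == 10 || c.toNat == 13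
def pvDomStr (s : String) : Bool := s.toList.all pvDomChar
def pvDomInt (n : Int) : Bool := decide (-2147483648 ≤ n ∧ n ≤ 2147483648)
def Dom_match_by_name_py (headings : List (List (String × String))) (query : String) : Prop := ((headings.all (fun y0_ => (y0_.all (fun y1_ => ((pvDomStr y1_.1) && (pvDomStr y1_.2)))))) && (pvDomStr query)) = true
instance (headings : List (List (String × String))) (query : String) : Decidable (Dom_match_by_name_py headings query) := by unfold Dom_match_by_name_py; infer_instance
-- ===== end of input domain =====

-- ===== PORT A =====
-- B merges A's two scans into one pass with a remembered substring fallback (objective: simpler).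
-- Pre_ excludes exactly the inputs where Python A raises KeyError (a heading without a
-- "title" key reached before any exact match); the ports read a missing title as "".

-- first loop of A: exact match scan
def pvALoop1 (q : String) : List (List (String × String)) → Int → Option Int
  | [], _ => none
  | h :: rest, i =>
    if q == PySem.Str.lower ((PySem.Dict.mk h).getD "title" "") then some i
    else pvALoop1 q rest (i + 1)

-- second loop of A: substring fallback scan
def pvALoop2 (q : String) : List (List (String × String)) → Int → Option Int
  | [], _ => none
  | h :: rest, i =>
    if PySem.Str.isIn q (PySem.Str.lower ((PySem.Dict.mk h).getD "title" "")) then some i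
    else pvALoop2 q rest (i + 1)

def match_by_name_py (headings : List (List (String × String))) (query : String) : Option Int :=
  let q := PySem.Str.lower query
  match pvALoop1 q headings 0 with
  | some i => some i
  | none => pvALoop2 q headings 0

-- ===== PORT B =====
-- single pass: return exact match at once, remember the earliest substring hit
def pvBLoop (q : String) : List (List (String × String)) → Int → Option Int → Option Int
  | [], _, fallback => fallback
  | h :: rest, i, fallback =>
    let t := PySem.Str.lower ((PySem.Dict.mk h).getD "title" "")
    if q == t then some i
    else pvBLoop q rest (i + 1)
      (if fallback.isNone && PySem.Str.isIn q t then some i else fallback)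

def match_by_name_py_alt (headings : List (List (String × String))) (query : String) : Option Int :=
  pvBLoop (PySem.Str.lower query) headings 0 none

-- ===== PRECONDITION & SPEC =====
def pvHasTitle (h : List (String × String)) : Bool := (PySem.Dict.mk h).contains "title"
def pvExact (q : String) (h : List (String × String)) : Bool :=
  q == PySem.Str.lower ((PySem.Dict.mk h).getD "title" "")

-- Pre_ excludes exactly the inputs on which Python A raises KeyError: a heading
-- lacking a "title" key that the first scan reaches (i.e. not preceded by an exact match).
def Pre_match_by_name_py (headings : List (List (String × String))) (query : String) : Prop :=
  ∀ m, (hm : m < headings.length) → pvHasTitle headings[m] = false →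
    ((headings.take m).any
      (fun h => pvHasTitle h && pvExact (PySem.Str.lower query) h)) = true
instance (headings : List (List (String × String))) (query : String) : Decidable (Pre_match_by_name_py headings query) := by unfold Pre_match_by_name_py; infer_instance

def pvWitness_match_by_name_py : (List (List (String × String))) × String :=
  ([[("title", "Intro")], [("title", "Methods")]], "intro")

def Spec_match_by_name_py (headings : List (List (String × String))) (query : String) (out : Option Int) : Prop := out = match_by_name_py_alt headings query
instance (headings : List (List (String × String))) (query : String) (out : Option Int) : Decidable (Spec_match_by_name_py headings query out) := by unfold Spec_match_by_name_py; infer_instance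

-- ===== CLAIM (what is proved, stated in full; the proofs are below) =====
def Claim_equal_match_by_name_py : Prop := ∀ (headings : List (List (String × String))) (query : String), Dom_match_by_name_py headings query → Pre_match_by_name_py headings query → Spec_match_by_name_py headings query (match_by_name_py headings query)

-- ===== LEMMAS AND PROOFS =====

-- the one-pass loop equals "exact scan, else the remembered fallback, else the substring scan"
theorem pvBLoop_eq (q : String) (hs : List (List (String × String))) (i : Int) (fb : Option Int) :
    pvBLoop q hs i fb =
      match pvALoop1 q hs i with
      | some j => some j
      | none => match fb with
                | some f => some f
                | none => pvALoop2 q hs i := by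
  induction hs generalizing i fb with
  | nil => cases fb <;> simp [pvBLoop, pvALoop1, pvALoop2]
  | cons h rest ih =>
    simp only [pvBLoop, pvALoop1, pvALoop2]
    by_cases hq : (q == PySem.Str.lower ((PySem.Dict.mk h).getD "title" "")) = true
    · simp [hq]
    · simp only [hq, if_false, Bool.false_eq_true]
      rw [ih]
      cases fb with
      | some f => simp
      | none =>
        by_cases hin : PySem.Chars.isIn q.toList
            (PySem.Chars.lower ((PySem.Dict.mk h).getD "title" "").toList) = true <;>
          simp [hin]

-- ===== VERDICT (by name: the statement is the Claim_ definition above) =====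
theorem match_by_name_py_spec : Claim_equal_match_by_name_py := by
  intro headings query _ _
  unfold Spec_match_by_name_py match_by_name_py match_by_name_py_alt
  rw [pvBLoop_eq]
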